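-- pv_equiv track=rewrite | github.com/Hamdi6053/oracle-rag-finetuned | src/run_marker.py | extract_title_from_context
-- ===== SOURCE A (Python) =====
-- def extract_title_from_context(markdown_content: str, image_position: int) -> str:
--     """Extract the previous closest title/header before the image position in the markdown."""
--     lines = markdown_content.split('\n')
--     title = "Untitled"
--     found_headers = []
--
--     # Look backwards from image position to find headers
--     for i in range(min(image_position, len(lines) - 1), -1, -1):
--         line = lines[i].strip()
--         if line.startswith('#'):
--             # Extract header text, prioritize higher level headers
--             if line.startswith('# '):
--                 found_headers.append(line.strip('# '))
--             elif line.startswith('## '):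
--                 found_headers.append(line.strip('## '))
--             elif line.startswith('### '):
--                 found_headers.append(line.strip('### '))
--
--     # Return the second closest header if available, otherwise the closest one
--     if len(found_headers) >= 2:
--         title = found_headers[1]  # Previous closest (second in the list)
--     elif len(found_headers) == 1:
--         title = found_headers[0]  # Only one header found
--
--     return title
-- ===== SOURCE B (Python) =====
-- def extract_title_from_context(markdown_content: str, image_position: int) -> str:
--     """Extract the previous closest title/header before the image position in the markdown."""
--     lines = markdown_content.split('\n')
--     last_index = min(image_position, len(lines) - 1)
--     prev = last = None
--     for i in range(0, last_index + 1):
--         line = lines[i].strip()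
--         if line.startswith('# ') or line.startswith('## ') or line.startswith('### '):
--             prev, last = last, line.strip('# ')
--     if prev is not None:
--         return prev
--     if last is not None:
--         return last
--     return "Untitled"
-- ===== Notes on version B (the rewrite author's own statement) =====
-- stated objective: simpler
-- what changed: B scans the lines forward keeping only the two most recent headers in rolling (prev, last) variables, instead of A's backward scan that accumulates a full list of all headers and then indexes into it.
import Mathlib
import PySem

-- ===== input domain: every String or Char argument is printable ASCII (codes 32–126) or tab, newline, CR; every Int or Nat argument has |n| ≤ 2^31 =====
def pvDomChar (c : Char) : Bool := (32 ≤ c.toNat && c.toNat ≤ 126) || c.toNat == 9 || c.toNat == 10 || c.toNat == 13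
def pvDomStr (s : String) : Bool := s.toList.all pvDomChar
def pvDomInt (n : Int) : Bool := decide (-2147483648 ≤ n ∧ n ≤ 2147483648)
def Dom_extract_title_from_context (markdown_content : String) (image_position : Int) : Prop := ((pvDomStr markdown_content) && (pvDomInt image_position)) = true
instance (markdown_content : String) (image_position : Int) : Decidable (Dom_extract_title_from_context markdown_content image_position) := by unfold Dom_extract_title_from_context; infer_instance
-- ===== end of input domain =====

-- B replaces A's backward scan that collects a full header list and indexes into it
-- by a single forward pass keeping only the two most recent headers (objective: simpler).

-- ===== PORT A =====
-- the stripped line at index i; every i the loops visit is in bounds, so pyGetD is exact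
def pvLineAt (lines : List String) (i : Int) : String :=
  PySem.Str.strip (PySem.List.pyGetD lines i "")

-- loop body of A on the stripped line
def pvAStepS (found : List String) (line : String) : List String :=
  if PySem.Str.startswith line "#" then
    if PySem.Str.startswith line "# " then found ++ [PySem.Str.stripChars line "# "]
    else if PySem.Str.startswith line "## " then found ++ [PySem.Str.stripChars line "# "]
    else if PySem.Str.startswith line "### " then found ++ [PySem.Str.stripChars line "# "]
    else found
  else found

def pvAStep (lines : List String) (found : List String) (i : Int) : List String :=
  pvAStepS found (pvLineAt lines i)

def extract_title_from_context (markdown_content : String) (image_position : Int) : String :=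
  let lines := (PySem.Str.split? markdown_content "\n").getD []   -- sep "\n" ≠ "", so split? is never none
  let found := (PySem.List.pyRange (min image_position ((lines.length : Int) - 1)) (-1) (-1)).foldl
      (pvAStep lines) []
  if found.length ≥ 2 then PySem.List.pyGetD found 1 "Untitled"
  else if found.length = 1 then PySem.List.pyGetD found 0 "Untitled"
  else "Untitled"

-- ===== PORT B =====
-- loop body of B on the stripped line: roll (prev, last) forward
def pvBStepS (pl : Option String × Option String) (line : String) :
    Option String × Option String :=
  if PySem.Str.startswith line "# " || PySem.Str.startswith line "## "
      || PySem.Str.startswith line "### " then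
    (pl.2, some (PySem.Str.stripChars line "# "))
  else pl

def pvBStep (lines : List String) (pl : Option String × Option String) (i : Int) :
    Option String × Option String :=
  pvBStepS pl (pvLineAt lines i)

def extract_title_from_context_alt (markdown_content : String) (image_position : Int) : String :=
  let lines := (PySem.Str.split? markdown_content "\n").getD []   -- sep "\n" ≠ "", so split? is never none
  let last_index := min image_position ((lines.length : Int) - 1)
  let pl := (PySem.List.pyRange 0 (last_index + 1) 1).foldl (pvBStep lines) (none, none)
  match pl.1 with
  | some t => t
  | none =>
    match pl.2 with
    | some t => t
    | none => "Untitled"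

-- ===== PRECONDITION & SPEC =====
def Spec_extract_title_from_context (markdown_content : String) (image_position : Int) (out : String) : Prop := out = extract_title_from_context_alt markdown_content image_position
instance (markdown_content : String) (image_position : Int) (out : String) : Decidable (Spec_extract_title_from_context markdown_content image_position out) := by unfold Spec_extract_title_from_context; infer_instance

-- ===== CLAIM (what is proved, stated in full; the proofs are below) =====
def Claim_equal_extract_title_from_context : Prop := ∀ (markdown_content : String) (image_position : Int), Dom_extract_title_from_context markdown_content image_position → Spec_extract_title_from_context markdown_content image_position (extract_title_from_context markdown_content image_position)

-- ===== LEMMAS AND PROOFS =====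

-- the header text extracted from a stripped line, if the programs accept it as one
def pvHdrS (line : String) : Option String :=
  if PySem.Str.startswith line "# " || PySem.Str.startswith line "## "
      || PySem.Str.startswith line "### " then
    some (PySem.Str.stripChars line "# ")
  else none

def pvHdr (lines : List String) (i : Int) : Option String := pvHdrS (pvLineAt lines i)

lemma chars_starts_mono {l p q : List Char} (hq : q <+: p)
    (h : PySem.Chars.startswith l p = true) : PySem.Chars.startswith l q = true := by
  rw [PySem.Chars.startswith_iff] at h ⊢
  exact hq.trans h

lemma str_starts_mono {s p q : String} (hq : q.toList <+: p.toList)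
    (h : PySem.Str.startswith s p = true) : PySem.Str.startswith s q = true := by
  simp only [PySem.Str.startswith_eq] at h ⊢
  exact chars_starts_mono hq h

lemma pvAStepS_eq (found : List String) (s : String) :
    pvAStepS found s = found ++ (pvHdrS s).toList := by
  unfold pvAStepS pvHdrS
  by_cases h1 : PySem.Str.startswith s "# " = true
  · have h0 : PySem.Str.startswith s "#" = true := str_starts_mono (by decide) h1
    have hc : (PySem.Str.startswith s "# " || PySem.Str.startswith s "## "
        || PySem.Str.startswith s "### ") = true := by
      simp only [h1, Bool.true_or]
    rw [if_pos h0, if_pos h1, if_pos hc]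
    rfl
  · by_cases h2 : PySem.Str.startswith s "## " = true
    · have h0 : PySem.Str.startswith s "#" = true := str_starts_mono (by decide) h2
      have hc : (PySem.Str.startswith s "# " || PySem.Str.startswith s "## "
          || PySem.Str.startswith s "### ") = true := by
        simp only [h2, Bool.or_true, Bool.true_or]
      rw [if_pos h0, if_neg h1, if_pos h2, if_pos hc]
      rfl
    · by_cases h3 : PySem.Str.startswith s "### " = true
      · have h0 : PySem.Str.startswith s "#" = true := str_starts_mono (by decide) h3
        have hc : (PySem.Str.startswith s "# " || PySem.Str.startswith s "## "
            || PySem.Str.startswith s "### ") = true := by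
          simp only [h3, Bool.or_true]
        rw [if_pos h0, if_neg h1, if_neg h2, if_pos h3, if_pos hc]
        rfl
      · have hc : ¬ (PySem.Str.startswith s "# " || PySem.Str.startswith s "## "
            || PySem.Str.startswith s "### ") = true := by
          simp only [Bool.not_eq_true] at h1 h2 h3
          simp only [h1, h2, h3, Bool.or_false]
          decide
        rw [if_neg hc]
        by_cases h0 : PySem.Str.startswith s "#" = true
        · rw [if_pos h0, if_neg h1, if_neg h2, if_neg h3]
          simp
        · rw [if_neg h0]
          simp

lemma foldA (lines : List String) :
    ∀ (idxs : List Int) (acc : List String),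
      idxs.foldl (pvAStep lines) acc = acc ++ idxs.filterMap (pvHdr lines) := by
  intro idxs
  induction idxs with
  | nil => simp
  | cons i rest ih =>
    intro acc
    rw [List.foldl_cons, ih, List.filterMap_cons]
    show (pvAStepS acc (pvLineAt lines i)) ++ _ = _
    rw [pvAStepS_eq]
    cases h : pvHdrS (pvLineAt lines i) <;> simp [pvHdr, h]

-- B's fold, seen on the list of header texts only
def pvG (pl : Option String × Option String) (ts : List String) :
    Option String × Option String :=
  ts.foldl (fun pl t => (pl.2, some t)) pl

lemma pvBStepS_eq (pl : Option String × Option String) (s : String) :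
    pvBStepS pl s =
      match pvHdrS s with
      | some t => (pl.2, some t)
      | none => pl := by
  unfold pvBStepS pvHdrS
  split_ifs <;> rfl

lemma foldB (lines : List String) :
    ∀ (idxs : List Int) (pl : Option String × Option String),
      idxs.foldl (pvBStep lines) pl = pvG pl (idxs.filterMap (pvHdr lines)) := by
  intro idxs
  induction idxs with
  | nil => intro pl; rfl
  | cons i rest ih =>
    intro pl
    rw [List.foldl_cons, ih, List.filterMap_cons]
    show pvG (pvBStepS pl (pvLineAt lines i)) _ = _
    rw [pvBStepS_eq]
    cases h : pvHdrS (pvLineAt lines i) <;> simp [pvHdr, pvG, h]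

lemma pvG_rev : ∀ (ts : List String) (pl : Option String × Option String),
    pvG pl ts =
      match ts.reverse with
      | [] => pl
      | [a] => (pl.2, some a)
      | a :: b :: _ => (some b, some a) := by
  intro ts
  induction ts with
  | nil => intro pl; rfl
  | cons t rest ih =>
    intro pl
    have : pvG pl (t :: rest) = pvG (pl.2, some t) rest := rfl
    rw [this, ih]
    cases hr : rest.reverse with
    | nil =>
      have : rest = [] := by simpa using congrArg List.reverse hr
      simp [this]
    | cons a rest' =>
      cases rest' with
      | nil => simp [hr]
      | cons b rest'' => simp [hr]

-- ===== VERDICT (by name: the statement is the Claim_ definition above) =====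
theorem extract_title_from_context_spec : Claim_equal_extract_title_from_context := by
  intro markdown_content image_position _
  show _ = _
  unfold extract_title_from_context extract_title_from_context_alt
  dsimp only
  generalize (PySem.Str.split? markdown_content "\n").getD [] = lines
  generalize min image_position ((lines.length : Int) - 1) = m
  have hrange : PySem.List.pyRange m (-1) (-1) = (PySem.List.pyRange 0 (m + 1) 1).reverse := by
    have := PySem.List.pyRange_neg_one_eq_reverse m (-1)
    norm_num at this; exact this
  rw [hrange, foldA, foldB, List.filterMap_reverse, pvG_rev]
  cases hr : ((PySem.List.pyRange 0 (m + 1) 1).filterMap (pvHdr lines)).reverse with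
  | nil => simp
  | cons a rest =>
    cases rest with
    | nil => simp [PySem.List.pyGetD]
    | cons b rest' => simp [PySem.List.pyGetD, PySem.List.pyIdx?, PySem.List.pyGet?]
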